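-- pv_equiv track=rewrite | github.com/maxkdann/CP164 | dann4440_a01/src/functions.py | matrix_rotate_right
-- ===== SOURCE A (Python) =====
-- def matrix_rotate_right(a):
--     """
--     -------------------------------------------------------
--     Returns a copy of a 2D matrix rotated to the right.
--     a must be unchanged.
--     Use: b = matrix_rotate_right(a)
--     -------------------------------------------------------
--     Parameters:
--         a - a 2D list of values (2d list of int/float)
--     Returns:
--         b - the rotated 2D list of values (2D list of int/float)
--     -------------------------------------------------------
--     """
--     b = [[0]*len(a) for i in range(len(a[0]))]
--     for j in range(len(a)-1,-1,-1):
--         for i in range(len(a[0])):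
--             b[i][j] = a[j][i]
--     for i in range(len(b)):
--         b[i] = b[i][::-1]
--     return b
-- ===== SOURCE B (Python) =====
-- def matrix_rotate_right(a):
--     rows = len(a)
--     cols = len(a[0])
--     return [[a[rows - 1 - j][i] for j in range(rows)] for i in range(cols)]
-- ===== Notes on version B (the rewrite author's own statement) =====
-- stated objective: simpler
-- what changed: B fuses A's zero-matrix allocation, transpose loop and per-row reversal pass into a single direct-index comprehension b[i][k] = a[rows-1-k][i], with no intermediate matrix and no reversal step.
import Mathlib
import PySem

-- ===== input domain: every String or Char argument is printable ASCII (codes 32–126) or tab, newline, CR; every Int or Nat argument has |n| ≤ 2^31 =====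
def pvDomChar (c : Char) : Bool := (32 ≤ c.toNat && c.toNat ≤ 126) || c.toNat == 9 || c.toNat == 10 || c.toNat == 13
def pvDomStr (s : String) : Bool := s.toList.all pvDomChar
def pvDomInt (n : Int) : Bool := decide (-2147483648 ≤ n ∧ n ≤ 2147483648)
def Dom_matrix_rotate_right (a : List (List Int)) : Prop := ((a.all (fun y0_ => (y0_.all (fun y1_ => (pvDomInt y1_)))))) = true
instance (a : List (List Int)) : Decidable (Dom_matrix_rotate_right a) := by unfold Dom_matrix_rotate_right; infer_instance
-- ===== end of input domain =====

-- B replaces A's build-transpose-then-reverse-each-row algorithm with a single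
-- direct-index comprehension (a simpler decomposition; same asymptotic cost).

-- ===== PORT A =====
-- Transliteration of A. Python's a[0] on empty a and a[j][i] on a too-short row raise
-- IndexError; those inputs are excluded by Pre_ below, so headD/getD are exact on Pre_.
-- range(len(a)-1,-1,-1) is (List.range rows).reverse; b[i][::-1] is List.reverse.
def matrix_rotate_right (a : List (List Int)) : List (List Int) :=
  let rows := a.length
  let cols := (a.headD []).length
  let b0 : List (List Int) := (List.range cols).map (fun _ => List.replicate rows (0 : Int))
  let b1 := ((List.range rows).reverse).foldl
    (fun b j => (List.range cols).foldl
      (fun b i => b.set i ((b.getD i []).set j ((a.getD j []).getD i 0))) b) b0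
  b1.map (fun r => r.reverse)


-- ===== PORT B =====
-- Transliteration of Source B: result row i, entry j is a[rows-1-j][i] (getD exact on Pre_).
def matrix_rotate_right_alt (a : List (List Int)) : List (List Int) :=
  let rows := a.length
  let cols := (a.headD []).length
  (List.range cols).map (fun i => (List.range rows).map (fun j => (a.getD (rows - 1 - j) []).getD i 0))


-- ===== PRECONDITION & SPEC =====
-- Pre_ excludes exactly the inputs on which the Python A raises IndexError: the empty
-- matrix (a[0]) and matrices with some row shorter than row 0 (a[j][i]); B raises there too.
def Pre_matrix_rotate_right (a : List (List Int)) : Prop :=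
  a ≠ [] ∧ ∀ r ∈ a, (a.headD []).length ≤ r.length
instance (a : List (List Int)) : Decidable (Pre_matrix_rotate_right a) := by
  unfold Pre_matrix_rotate_right; infer_instance
def pvWitness_matrix_rotate_right : List (List Int) := [[1, 2, 3], [4, 5, 6]]

def Spec_matrix_rotate_right (a : List (List Int)) (out : List (List Int)) : Prop := out = matrix_rotate_right_alt a
instance (a : List (List Int)) (out : List (List Int)) : Decidable (Spec_matrix_rotate_right a out) := by unfold Spec_matrix_rotate_right; infer_instance

-- ===== CLAIM (what is proved, stated in full; the proofs are below) =====
def Claim_equal_matrix_rotate_right : Prop := ∀ (a : List (List Int)), Dom_matrix_rotate_right a → Pre_matrix_rotate_right a → Spec_matrix_rotate_right a (matrix_rotate_right a)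

-- ===== LEMMAS AND PROOFS =====

theorem foldl_set_get? (f : Nat → Int) (js : List Nat) (r0 : List Int) (k : Nat)
    (hk : k < r0.length) :
    (js.foldl (fun r j => r.set j (f j)) r0)[k]? = some (if k ∈ js then f k else r0[k]) := by
  induction js generalizing r0 with
  | nil => simp [List.getElem?_eq_getElem hk]
  | cons j rest ih =>
    simp only [List.foldl_cons]
    rw [ih (r0.set j (f j)) (by simpa using hk)]
    by_cases hkr : k ∈ rest
    · simp [hkr]
    · by_cases hjk : j = k
      · simp [hkr, hjk]
      · have hm : k ∉ (j :: rest) := by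
          simp only [List.mem_cons, not_or]
          exact ⟨fun h => hjk h.symm, hkr⟩
        rw [if_neg hkr, if_neg hm, List.getElem_set, if_neg hjk]

theorem foldl_set_length (f : Nat → Int) (js : List Nat) (r0 : List Int) :
    (js.foldl (fun r j => r.set j (f j)) r0).length = r0.length := by
  induction js generalizing r0 with
  | nil => rfl
  | cons j rest ih => simpa using ih (r0.set j (f j))

theorem inner_length (g : Nat → List Int → List Int) (n : Nat) (b : List (List Int)) :
    ((List.range n).foldl (fun b i => b.set i (g i (b.getD i []))) b).length = b.length := by
  induction n with
  | zero => rfl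
  | succ n ih => rw [List.range_succ, List.foldl_append]; simpa using ih

theorem inner_get? (g : Nat → List Int → List Int) (n : Nat) (b : List (List Int))
    (i : Nat) (hi : i < b.length) :
    ((List.range n).foldl (fun b i => b.set i (g i (b.getD i []))) b)[i]?
      = some (if i < n then g i (b[i]) else b[i]) := by
  induction n with
  | zero => simp [List.getElem?_eq_getElem hi]
  | succ n ih =>
    rw [List.range_succ, List.foldl_append]
    simp only [List.foldl_cons, List.foldl_nil]
    rw [List.getElem?_set]
    by_cases hni : n = i
    · subst hni
      have hlen : ((List.range n).foldl (fun b i => b.set i (g i (b.getD i []))) b).length = b.length :=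
        inner_length g n b
      rw [if_pos rfl, if_pos (by rw [hlen]; exact hi)]
      have hD : ((List.range n).foldl (fun b i => b.set i (g i (b.getD i []))) b).getD n [] = b[n] := by
        rw [List.getD_eq_getElem?_getD, ih]
        simp
      rw [hD]
      simp
    · rw [if_neg hni, ih]
      simp [show (i < n + 1) ↔ i < n by omega]

theorem pvFoldlLenFixed {α β : Type} (f : List α → β → List α)
    (hl : ∀ l x, (f l x).length = l.length) (js : List β) (b : List α) :
    (js.foldl f b).length = b.length := by
  induction js generalizing b with
  | nil => rfl
  | cons j rest ih => rw [List.foldl_cons, ih, hl]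

theorem outer_get? (v : Nat → Nat → Int) (cols : Nat) (js : List Nat)
    (b : List (List Int)) (hb : b.length = cols) (i : Nat) (hi : i < cols) :
    (js.foldl
        (fun b j => (List.range cols).foldl
          (fun b i => b.set i ((b.getD i []).set j (v j i))) b) b)[i]?
      = some (js.foldl (fun r j => r.set j (v j i)) (b[i]'(by rw [hb]; exact hi))) := by
  induction js generalizing b with
  | nil => simp [List.getElem?_eq_getElem (by rw [hb]; exact hi : i < b.length)]
  | cons j rest ih =>
    simp only [List.foldl_cons]
    have hb' : ((List.range cols).foldl
        (fun b i => b.set i ((b.getD i []).set j (v j i))) b).length = cols := by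
      rw [inner_length (fun i r => r.set j (v j i)) cols b]; exact hb
    rw [ih _ hb']
    have hstep := inner_get? (fun i r => r.set j (v j i)) cols b i (by rw [hb]; exact hi)
    rw [List.getElem?_eq_getElem (by rw [hb']; exact hi)] at hstep
    have := Option.some.inj hstep
    rw [this, if_pos hi]

theorem ports_eq (a : List (List Int)) : matrix_rotate_right a = matrix_rotate_right_alt a := by
  simp only [matrix_rotate_right, matrix_rotate_right_alt]
  have hlen : ∀ (l : List (List Int)) (j : Nat),
      ((List.range (a.headD []).length).foldl
        (fun b i => b.set i ((b.getD i []).set j ((a.getD j []).getD i 0))) l).length = l.length :=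
    fun l j => inner_length (fun i r => r.set j ((a.getD j []).getD i 0)) _ l
  have hb0 : ((List.range (a.headD []).length).map
      (fun _ => List.replicate a.length (0:Int))).length = (a.headD []).length := by simp
  have houter : (((List.range a.length).reverse).foldl
      (fun b j => (List.range (a.headD []).length).foldl
        (fun b i => b.set i ((b.getD i []).set j ((a.getD j []).getD i 0))) b)
      ((List.range (a.headD []).length).map (fun _ => List.replicate a.length (0:Int)))).length
      = (a.headD []).length :=
    (pvFoldlLenFixed _ hlen _ _).trans hb0
  apply List.ext_getElem
  · rw [List.length_map, houter, List.length_map, List.length_range]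
  · intro i h1 h2
    have hi : i < (a.headD []).length := by simpa using h2
    -- the i-th row of A's intermediate matrix b1
    have hrow := outer_get? (fun j i => (a.getD j []).getD i 0) (a.headD []).length
      ((List.range a.length).reverse)
      ((List.range (a.headD []).length).map (fun _ => List.replicate a.length (0:Int)))
      hb0 i hi
    rw [List.getElem?_eq_getElem (by rw [pvFoldlLenFixed _ hlen, hb0]; exact hi)] at hrow
    have hrowv := Option.some.inj hrow
    rw [List.getElem_map, hrowv]
    have hb0i : (((List.range (a.headD []).length).map
        (fun _ => List.replicate a.length (0:Int)))[i]'(by rw [hb0]; exact hi))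
        = List.replicate a.length (0:Int) := by simp
    rw [hb0i]
    have hrlen : (((List.range a.length).reverse).foldl
        (fun r j => r.set j ((a.getD j []).getD i 0)) (List.replicate a.length (0:Int))).length
        = a.length := by
      rw [foldl_set_length]; simp
    apply List.ext_getElem
    · rw [List.length_reverse, hrlen, List.getElem_map, List.length_map, List.length_range]
    · intro k hk1 hk2
      have hk : k < a.length := by simpa using hk2
      simp only [List.getElem_reverse, List.getElem_map, List.getElem_range]
      have hmem : (a.length - 1 - k) ∈ (List.range a.length).reverse := by
        simp only [List.mem_reverse, List.mem_range]; omega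
      have hval := foldl_set_get? (fun j => (a.getD j []).getD i 0)
        ((List.range a.length).reverse) (List.replicate a.length (0:Int))
        (a.length - 1 - k) (by simp; omega)
      rw [List.getElem?_eq_getElem (by rw [foldl_set_length]; simp; omega)] at hval
      have hv := Option.some.inj hval
      rw [if_pos hmem] at hv
      simp only [hrlen]
      exact hv

-- ===== VERDICT (by name: the statement is the Claim_ definition above) =====
theorem matrix_rotate_right_spec : Claim_equal_matrix_rotate_right := by
  intro a _ _
  show matrix_rotate_right a = matrix_rotate_right_alt a
  exact ports_eq a
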